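-- pv_equiv track=rewrite | github.com/quantumlib/Cirq | cirq-core/cirq/vis/surface_code.py | get_data_and_meas_qubits
-- ===== SOURCE A (Python) =====
-- import itertools
-- from typing import Iterator, Set, Tuple
--
-- Coord = Tuple[int, int]
--
-- def _meas_with_boundaries(width, height) -> Iterator[Coord]:
--     """Helper iterator to yield the correct boundary measure qubits for a `width, height` patch."""
--     for x, y in itertools.product(range(width + 1), range(height + 1)):
--         if x == 0 and y % 2 == 1:
--             continue
--         if y == 0 and x % 2 == 0:
--             continue
--         if x == width and y % 2 == 0:
--             continue
--         if y == height and x % 2 == 1: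
--             continue
--
--         yield x, y
--
-- def get_data_and_meas_qubits(
--     width: int, height: int, offset_x: int = 0, offset_y: int = 0
-- ) -> Tuple[Set[Coord], Set[Coord]]:
--     """Return (x,y) coordinates for data and measure qubits.
--
--     Inputs use the "data qubit coordinate system" where width=height=d produces
--     enough qubits to support a distance-d surface code.
--
--     Output coordinates use the "all qubits coordinate system" where data qubit (i,j) is
--     at position (2i, 2j) and measure qubits are at (2i-1, 2j-1). All coordinates in the
--     "all qubits coordinate system" are integers.
--
--     Returns:
--         Two sets containing the data and measure qubit coordinates, respectively.
--     """
--     data = set(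
--         (2 * x + 2 * offset_x, 2 * y + 2 * offset_y) for x in range(width) for y in range(height)
--     )
--     meas = set(
--         (2 * x - 1 + 2 * offset_x, 2 * y - 1 + 2 * offset_y)
--         for x, y in _meas_with_boundaries(width, height)
--     )
--     return data, meas
-- ===== SOURCE B (Python) =====
-- def get_data_and_meas_qubits(width, height, offset_x=0, offset_y=0):
--     """Same result as A, but the measure set is built column by column from
--     closed-form y-ranges (no product-and-filter): the left edge keeps the
--     positive even rows, the right edge keeps a counted prefix of odd rows,
--     and interior columns keep a full shifted row range by parity."""
--     data = {(2 * (x + offset_x), 2 * (y + offset_y)) for x in range(width) for y in range(height)}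
--     meas = set()
--     if width > 0:
--         for x in range(width + 1):
--             if x == 0:
--                 ys = [2 * k for k in range(1, height // 2 + 1)]
--             elif x == width:
--                 n_odd = (height + 1) // 2 if width % 2 == 0 else height // 2
--                 ys = [2 * k + 1 for k in range(n_odd)]
--             elif x % 2 == 1:
--                 ys = range(height)
--             else:
--                 ys = range(1, height + 1)
--             for y in ys:
--                 meas.add((2 * (x + offset_x) - 1, 2 * (y + offset_y) - 1))
--     return data, meas
-- ===== Notes on version B (the rewrite author's own statement) =====
-- stated objective: alternative
-- what changed: The measure set is no longer a filtered cartesian product with four skip rules: B walks the columns once and emits each column's y-coordinates directly from closed-form ranges (left edge = positive even rows, right edge = a counted prefix of odd rows, interior columns = a full row range shifted by column parity), so no candidate is ever generated and rejected.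
import Mathlib
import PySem

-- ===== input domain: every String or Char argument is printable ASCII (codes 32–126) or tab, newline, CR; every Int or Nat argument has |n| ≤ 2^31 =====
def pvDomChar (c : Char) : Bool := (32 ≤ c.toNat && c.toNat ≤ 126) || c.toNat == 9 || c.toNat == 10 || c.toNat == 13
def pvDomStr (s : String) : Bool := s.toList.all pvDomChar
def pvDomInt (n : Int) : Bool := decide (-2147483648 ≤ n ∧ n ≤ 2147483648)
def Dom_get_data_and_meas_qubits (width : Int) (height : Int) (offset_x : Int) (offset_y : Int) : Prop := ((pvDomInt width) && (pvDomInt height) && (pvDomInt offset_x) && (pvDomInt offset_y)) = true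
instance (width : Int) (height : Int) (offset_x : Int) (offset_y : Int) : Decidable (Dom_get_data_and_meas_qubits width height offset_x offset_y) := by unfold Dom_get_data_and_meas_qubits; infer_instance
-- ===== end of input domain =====

-- B rebuilds the measure set column by column from closed-form y-ranges instead of
-- filtering the full (x, y) product; objective: alternative decomposition, same cost.

-- ===== PORT A =====
-- port of _meas_with_boundaries: itertools.product as flatMap, the four 'continue's as nested ifs
def pvMeasWithBoundaries (width : Int) (height : Int) : List (Int × Int) :=
  (PySem.List.pyRange 0 (width + 1) 1).flatMap (fun x =>
    (PySem.List.pyRange 0 (height + 1) 1).filterMap (fun y =>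
      if x = 0 ∧ PySem.Int.mod y 2 = 1 then none
      else if y = 0 ∧ PySem.Int.mod x 2 = 0 then none
      else if x = width ∧ PySem.Int.mod y 2 = 0 then none
      else if y = height ∧ PySem.Int.mod x 2 = 1 then none
      else some (x, y)))

def get_data_and_meas_qubits (width : Int) (height : Int) (offset_x : Int) (offset_y : Int) : (List (Int × Int)) × (List (Int × Int)) :=
  (PySem.Set.ofList ((PySem.List.pyRange 0 width 1).flatMap (fun x =>
      (PySem.List.pyRange 0 height 1).map (fun y => (2 * x + 2 * offset_x, 2 * y + 2 * offset_y)))),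
   PySem.Set.ofList ((pvMeasWithBoundaries width height).map (fun p =>
      (2 * p.1 - 1 + 2 * offset_x, 2 * p.2 - 1 + 2 * offset_y))))

-- ===== PORT B =====
-- the per-column y-lists of Source B: left edge, right edge (counted odd prefix), interior by parity
def pvAltYs (width : Int) (height : Int) (x : Int) : List Int :=
  if x = 0 then
    (PySem.List.pyRange 1 (PySem.Int.floordiv height 2 + 1) 1).map (fun k => 2 * k)
  else if x = width then
    (PySem.List.pyRange 0
      (if PySem.Int.mod width 2 = 0 then PySem.Int.floordiv (height + 1) 2
       else PySem.Int.floordiv height 2) 1).map (fun k => 2 * k + 1)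
  else if PySem.Int.mod x 2 = 1 then PySem.List.pyRange 0 height 1
  else PySem.List.pyRange 1 (height + 1) 1

def get_data_and_meas_qubits_alt (width : Int) (height : Int) (offset_x : Int) (offset_y : Int) : (List (Int × Int)) × (List (Int × Int)) :=
  (PySem.Set.ofList ((PySem.List.pyRange 0 width 1).flatMap (fun x =>
      (PySem.List.pyRange 0 height 1).map (fun y => (2 * (x + offset_x), 2 * (y + offset_y))))),
   if 0 < width then
     (PySem.List.pyRange 0 (width + 1) 1).foldl (fun s x =>
       (pvAltYs width height x).foldl
         (fun s y => PySem.Set.add s (2 * (x + offset_x) - 1, 2 * (y + offset_y) - 1)) s)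
       PySem.Set.empty
   else PySem.Set.empty)

-- ===== PRECONDITION & SPEC =====
def Spec_get_data_and_meas_qubits (width : Int) (height : Int) (offset_x : Int) (offset_y : Int) (out : (List (Int × Int)) × (List (Int × Int))) : Prop := out = get_data_and_meas_qubits_alt width height offset_x offset_y
instance (width : Int) (height : Int) (offset_x : Int) (offset_y : Int) (out : (List (Int × Int)) × (List (Int × Int))) : Decidable (Spec_get_data_and_meas_qubits width height offset_x offset_y out) := by unfold Spec_get_data_and_meas_qubits; infer_instance

-- ===== CLAIM (what is proved, stated in full; the proofs are below) =====
def Claim_equal_get_data_and_meas_qubits : Prop := ∀ (width : Int) (height : Int) (offset_x : Int) (offset_y : Int), Dom_get_data_and_meas_qubits width height offset_x offset_y → Spec_get_data_and_meas_qubits width height offset_x offset_y (get_data_and_meas_qubits width height offset_x offset_y)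

-- ===== LEMMAS AND PROOFS =====

-- the two PySem facts used throughout (divisor 2 is positive)
theorem pvMod2 (a : Int) : PySem.Int.mod a 2 = a % 2 :=
  PySem.Int.mod_eq_emod_of_pos (by omega)

theorem pvFd2 (a : Int) : PySem.Int.floordiv a 2 = a / 2 :=
  PySem.Int.floordiv_eq_ediv_of_pos (by omega)

-- dropping one absent value is the identity
theorem pvFilterMap_skip (a : Int) (l : List Int) (h : a ∉ l) :
    l.filterMap (fun y => if y = a then none else some y) = l := by
  induction l with
  | nil => rfl
  | cons b t ih =>
    simp only [List.mem_cons, not_or] at h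
    simp [show ¬ b = a from fun e => h.1 e.symm, ih h.2]

-- all even members of range(0, h+1), as a closed-form map
theorem pvEvens (h : Int) :
    (PySem.List.pyRange 0 (h + 1) 1).filterMap
        (fun y => if PySem.Int.mod y 2 = 1 then none else some y)
      = (PySem.List.pyRange 0 (PySem.Int.floordiv h 2 + 1) 1).map (fun k => 2 * k) := by
  by_cases hh : 0 ≤ h
  · refine Int.le_induction ?_ ?_ h hh
    · decide
    · intro n hn ih
      rw [PySem.List.pyRange_one_succ_right (show (0:Int) ≤ n + 1 by omega),
        List.filterMap_append, ih]
      by_cases hpar : (n + 1) % 2 = 1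
      · rw [List.filterMap_cons_none (by simp <;> omega),
          List.filterMap_nil, List.append_nil,
          show PySem.Int.floordiv (n + 1) 2 = PySem.Int.floordiv n 2 by
            rw [pvFd2, pvFd2]; omega]
      · rw [List.filterMap_cons_some (b := n + 1) (by simp <;> omega),
          List.filterMap_nil,
          show PySem.Int.floordiv (n + 1) 2 + 1 = (PySem.Int.floordiv n 2 + 1) + 1 by
            rw [pvFd2, pvFd2]; omega,
          PySem.List.pyRange_one_succ_right (show (0:Int) ≤ PySem.Int.floordiv n 2 + 1 by
            rw [pvFd2]; omega),
          List.map_append]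
        congr 1
        simp only [List.map_cons, List.map_nil, List.cons.injEq, and_true, pvFd2]
        omega
  · rw [PySem.List.pyRange_one_eq_nil (by omega),
      PySem.List.pyRange_one_eq_nil (by rw [pvFd2]; omega)]
    rfl

-- all odd members of range(0, h+1), as a closed-form map
theorem pvOdds (h : Int) :
    (PySem.List.pyRange 0 (h + 1) 1).filterMap
        (fun y => if PySem.Int.mod y 2 = 0 then none else some y)
      = (PySem.List.pyRange 0 (PySem.Int.floordiv (h + 1) 2) 1).map (fun k => 2 * k + 1) := by
  by_cases hh : 0 ≤ h
  · refine Int.le_induction ?_ ?_ h hh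
    · decide
    · intro n hn ih
      rw [PySem.List.pyRange_one_succ_right (show (0:Int) ≤ n + 1 by omega),
        List.filterMap_append, ih]
      by_cases hpar : (n + 1) % 2 = 0
      · rw [List.filterMap_cons_none (by simp <;> omega),
          List.filterMap_nil, List.append_nil,
          show PySem.Int.floordiv (n + 1 + 1) 2 = PySem.Int.floordiv (n + 1) 2 by
            rw [pvFd2, pvFd2]; omega]
      · rw [List.filterMap_cons_some (b := n + 1) (by simp <;> omega),
          List.filterMap_nil,
          show PySem.Int.floordiv (n + 1 + 1) 2 = PySem.Int.floordiv (n + 1) 2 + 1 by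
            rw [pvFd2, pvFd2]; omega,
          PySem.List.pyRange_one_succ_right (show (0:Int) ≤ PySem.Int.floordiv (n + 1) 2 by
            rw [pvFd2]; omega),
          List.map_append]
        congr 1
        simp only [List.map_cons, List.map_nil, List.cons.injEq, and_true, pvFd2]
        omega
  · rw [PySem.List.pyRange_one_eq_nil (by omega),
      PySem.List.pyRange_one_eq_nil (by rw [pvFd2]; omega)]
    rfl

-- even members without 0: the left-edge list of Source B
theorem pvEvensNoZero (h : Int) :
    (PySem.List.pyRange 0 (h + 1) 1).filterMap
        (fun y => if PySem.Int.mod y 2 = 1 then none else if y = 0 then none else some y)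
      = (PySem.List.pyRange 1 (PySem.Int.floordiv h 2 + 1) 1).map (fun k => 2 * k) := by
  by_cases hh : 0 ≤ h
  · have hev := pvEvens h
    rw [PySem.List.pyRange_one_cons (show (0:Int) < h + 1 by omega),
      PySem.List.pyRange_one_cons (show (0:Int) < PySem.Int.floordiv h 2 + 1 by
        rw [pvFd2]; omega),
      List.filterMap_cons_some (b := (0:Int)) (by
        have hm : PySem.Int.mod (0:Int) 2 = 0 := by decide
        simp [hm]),
      List.map_cons] at hev
    simp only [zero_add] at hev
    injection hev with h0 htail
    rw [PySem.List.pyRange_one_cons (show (0:Int) < h + 1 by omega),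
      List.filterMap_cons_none (by
        have hm : PySem.Int.mod (0:Int) 2 = 0 := by decide
        simp [hm])]
    simp only [zero_add]
    rw [← htail]
    apply List.filterMap_congr
    intro y hy
    have hy1 : 1 ≤ y := ((PySem.List.mem_pyRange_one).mp hy).1
    simp [show ¬ y = 0 by omega]
  · rw [PySem.List.pyRange_one_eq_nil (by omega),
      PySem.List.pyRange_one_eq_nil (by rw [pvFd2]; omega)]
    rfl

-- odd members without h itself: the right-edge list of Source B for odd width
theorem pvOddsNoTop (h : Int) :
    (PySem.List.pyRange 0 (h + 1) 1).filterMap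
        (fun y => if PySem.Int.mod y 2 = 0 then none else if y = h then none else some y)
      = (PySem.List.pyRange 0 (PySem.Int.floordiv h 2) 1).map (fun k => 2 * k + 1) := by
  by_cases hh : 0 ≤ h
  · by_cases hpar : h % 2 = 0
    · have key := pvOdds h
      rw [show PySem.Int.floordiv (h + 1) 2 = PySem.Int.floordiv h 2 by
        rw [pvFd2, pvFd2]; omega] at key
      rw [← key]
      apply List.filterMap_congr
      intro y hy
      simp only [pvMod2]
      by_cases hm : y % 2 = 0
      · simp [hm]
      · simp [hm, show ¬ y = h by omega]
    · rw [PySem.List.pyRange_one_succ_right (show (0:Int) ≤ h by omega),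
        List.filterMap_append,
        List.filterMap_cons_none (by
          have hm : PySem.Int.mod h 2 = 1 := by rw [pvMod2]; omega
          simp [hm]),
        List.filterMap_nil, List.append_nil]
      have key := pvOdds (h - 1)
      rw [show h - 1 + 1 = h by omega] at key
      rw [← key]
      apply List.filterMap_congr
      intro y hy
      have hylt : y < h := ((PySem.List.mem_pyRange_one).mp hy).2
      simp only [pvMod2]
      by_cases hm : y % 2 = 0
      · simp [hm]
      · simp [hm, show ¬ y = h by omega]
  · rw [PySem.List.pyRange_one_eq_nil (by omega),
      PySem.List.pyRange_one_eq_nil (by rw [pvFd2]; omega)]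
    rfl

-- range(0, h+1) minus its top element
theorem pvDropTop (h : Int) :
    (PySem.List.pyRange 0 (h + 1) 1).filterMap (fun y => if y = h then none else some y)
      = PySem.List.pyRange 0 h 1 := by
  by_cases hh : 0 ≤ h
  · rw [PySem.List.pyRange_one_succ_right hh, List.filterMap_append,
      List.filterMap_cons_none (by simp), List.filterMap_nil, List.append_nil]
    exact pvFilterMap_skip h _ (fun hmem => by
      have := ((PySem.List.mem_pyRange_one).mp hmem).2; omega)
  · rw [PySem.List.pyRange_one_eq_nil (by omega), PySem.List.pyRange_one_eq_nil (by omega)]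
    rfl

-- range(0, h+1) minus 0
theorem pvDropZero (h : Int) :
    (PySem.List.pyRange 0 (h + 1) 1).filterMap (fun y => if y = 0 then none else some y)
      = PySem.List.pyRange 1 (h + 1) 1 := by
  by_cases hh : 0 < h + 1
  · rw [PySem.List.pyRange_one_cons hh, List.filterMap_cons_none (by simp)]
    simp only [zero_add]
    exact pvFilterMap_skip 0 _ (fun hmem => by
      have := ((PySem.List.mem_pyRange_one).mp hmem).1; omega)
  · rw [PySem.List.pyRange_one_eq_nil (by omega), PySem.List.pyRange_one_eq_nil (by omega)]
    rfl

-- the heart: for 1 ≤ w and 0 ≤ x ≤ w, A's filtered column equals B's closed-form column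
theorem pvColumn (w h x : Int) (hw : 1 ≤ w) (hx0 : 0 ≤ x) (hxw : x ≤ w) :
    (PySem.List.pyRange 0 (h + 1) 1).filterMap (fun y =>
        if x = 0 ∧ PySem.Int.mod y 2 = 1 then none
        else if y = 0 ∧ PySem.Int.mod x 2 = 0 then none
        else if x = w ∧ PySem.Int.mod y 2 = 0 then none
        else if y = h ∧ PySem.Int.mod x 2 = 1 then none
        else some (x, y))
      = (pvAltYs w h x).map (fun y => (x, y)) := by
  unfold pvAltYs
  by_cases hx : x = 0
  · subst hx
    rw [if_pos rfl]
    have key := congrArg (List.map (fun y => ((0:Int), y))) (pvEvensNoZero h)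
    rw [List.map_filterMap] at key
    rw [← key]
    apply List.filterMap_congr
    intro y _
    simp only [pvMod2]
    by_cases h1 : y % 2 = 1
    · simp [h1]
    · by_cases h2 : y = 0
      · simp [h1, h2]
      · simp [h1, h2, show ¬ (0:Int) = w by omega]
  · rw [if_neg hx]
    by_cases hxw' : x = w
    · subst hxw'
      rw [if_pos rfl]
      by_cases hp : PySem.Int.mod x 2 = 0
      · rw [if_pos hp]
        rw [pvMod2] at hp
        have key := congrArg (List.map (fun y => (x, y))) (pvOdds h)
        rw [List.map_filterMap] at key
        rw [← key]
        apply List.filterMap_congr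
        intro y _
        simp only [pvMod2]
        by_cases h1 : y % 2 = 0
        · by_cases h2 : y = 0 <;> simp [h1, h2, hx, hp]
        · have h2 : ¬ y = 0 := by omega
          simp [h1, h2, hx, hp]
      · rw [if_neg hp]
        rw [pvMod2] at hp
        have hp1 : x % 2 = 1 := by omega
        have key := congrArg (List.map (fun y => (x, y))) (pvOddsNoTop h)
        rw [List.map_filterMap] at key
        rw [← key]
        apply List.filterMap_congr
        intro y _
        simp only [pvMod2]
        by_cases h1 : y % 2 = 0
        · by_cases h2 : y = 0 <;> simp [h1, h2, hx, hp1]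
        · have h2 : ¬ y = 0 := by omega
          by_cases h3 : y = h <;> simp [h1, h2, h3, hx, hp1]
    · rw [if_neg hxw']
      by_cases hp : PySem.Int.mod x 2 = 1
      · rw [if_pos hp]
        rw [pvMod2] at hp
        have key := congrArg (List.map (fun y => (x, y))) (pvDropTop h)
        rw [List.map_filterMap] at key
        rw [← key]
        apply List.filterMap_congr
        intro y _
        simp only [pvMod2]
        by_cases h1 : y = h
        · simp [h1, hx, hxw', hp]
        · by_cases h2 : y = 0
          · simp [h1, h2, show ¬ (0:Int) = h from by omega, hx, hxw', hp]
          · simp [h1, h2, hx, hxw', hp]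
      · rw [if_neg hp]
        rw [pvMod2] at hp
        have hp0 : x % 2 = 0 := by omega
        have key := congrArg (List.map (fun y => (x, y))) (pvDropZero h)
        rw [List.map_filterMap] at key
        rw [← key]
        apply List.filterMap_congr
        intro y _
        simp only [pvMod2]
        by_cases h1 : y = 0
        · simp [h1, hx, hxw', hp0]
        · by_cases h2 : y = h
          · simp [h1, h2, show ¬ h = 0 from by omega, hx, hxw', hp0]
          · simp [h1, h2, hx, hxw', hp0]

-- degenerate width = 0: every candidate is filtered out
theorem pvMeasZero (h : Int) : pvMeasWithBoundaries 0 h = [] := by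
  unfold pvMeasWithBoundaries
  rw [PySem.List.pyRange_one_singleton]
  simp only [List.flatMap_cons, List.flatMap_nil, List.append_nil]
  rw [List.filterMap_eq_nil_iff]
  intro y hy
  simp only [pvMod2]
  by_cases h1 : y % 2 = 1
  · simp [h1]
  · simp [show y % 2 = 0 by omega]

theorem get_data_and_meas_qubits_spec_aux (width height offset_x offset_y : Int) :
    get_data_and_meas_qubits width height offset_x offset_y
      = get_data_and_meas_qubits_alt width height offset_x offset_y := by
  unfold get_data_and_meas_qubits get_data_and_meas_qubits_alt
  simp only [Prod.mk.injEq]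
  refine ⟨?_, ?_⟩
  · -- data: the two coordinate expressions coincide
    apply congrArg
    apply List.flatMap_congr
    intro x _
    apply List.map_congr_left
    intro y _
    simp only [Prod.mk.injEq]
    constructor <;> ring
  · by_cases hw : 0 < width
    · rw [if_pos hw]
      have hB : (PySem.List.pyRange 0 (width + 1) 1).foldl (fun s x =>
            (pvAltYs width height x).foldl
              (fun s y => PySem.Set.add s (2 * (x + offset_x) - 1, 2 * (y + offset_y) - 1)) s)
            PySem.Set.empty
          = PySem.Set.ofList ((PySem.List.pyRange 0 (width + 1) 1).flatMap (fun x =>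
              (pvAltYs width height x).map
                (fun y => (2 * (x + offset_x) - 1, 2 * (y + offset_y) - 1)))) := by
        rw [PySem.Set.ofList_eq_foldl, List.foldl_flatMap]
        simp only [List.foldl_map]
        rfl
      rw [hB]
      apply congrArg
      unfold pvMeasWithBoundaries
      rw [List.map_flatMap]
      apply List.flatMap_congr
      intro x hx
      obtain ⟨hx0, hxlt⟩ := (PySem.List.mem_pyRange_one).mp hx
      rw [pvColumn width height x (by omega) hx0 (by omega), List.map_map]
      apply List.map_congr_left
      intro y _
      simp only [Function.comp, Prod.mk.injEq]
      constructor <;> ring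
    · rw [if_neg hw]
      by_cases hw0 : width = 0
      · subst hw0
        rw [pvMeasZero]
        rfl
      · have hnil : pvMeasWithBoundaries width height = [] := by
          unfold pvMeasWithBoundaries
          rw [PySem.List.pyRange_one_eq_nil (a := 0) (b := width + 1) (by omega)]
          rfl
        rw [hnil]
        rfl

-- ===== VERDICT (by name: the statement is the Claim_ definition above) =====
theorem get_data_and_meas_qubits_spec : Claim_equal_get_data_and_meas_qubits := by
  intro width height offset_x offset_y _
  exact get_data_and_meas_qubits_spec_aux width height offset_x offset_y
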